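-- pv_equiv track=rewrite | github.com/TatoNaranjo/Codeforces-Solutions | Practice ICPC/K.py | make_pre_computed
-- ===== SOURCE A (Python) =====
-- def make_pre_computed(people,n,m):
--     jokes_in_common = {}
--     for i in range(n):
--         current = people[i]
--         for j in range(i+1, n):
--             next_person = people[j]
--             counter = 0
--             for k in range(m):
--                 if current[k] == next_person[k]:
--                     counter += 1
--             jokes_in_common.update({f"{i+1} {j+1}":counter})
--
--     return jokes_in_common
-- ===== SOURCE B (Python) =====
-- def make_pre_computed(people, n, m):
--     # Column-by-column bucket counting: start every pair at 0, then for each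
--     # column group the people by value and credit one match to every pair
--     # inside a group.
--     res = {f"{i + 1} {j + 1}": 0 for i in range(n) for j in range(i + 1, n)}
--     if n < 2:
--         return res
--     for k in range(m):
--         groups = {}
--         for p in range(n):
--             groups.setdefault(people[p][k], []).append(p)
--         for g in groups.values():
--             for a in range(len(g)):
--                 for b in range(a + 1, len(g)):
--                     res[f"{g[a] + 1} {g[b] + 1}"] += 1
--     return res
-- ===== Notes on version B (the rewrite author's own statement) =====
-- stated objective: alternative
-- what changed: Instead of scanning all m columns for each of the n^2/2 pairs, B initialises every pair at 0 and then walks the columns once, bucketing people by their value in that column and crediting one match to every pair inside a bucket.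
import Mathlib
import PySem

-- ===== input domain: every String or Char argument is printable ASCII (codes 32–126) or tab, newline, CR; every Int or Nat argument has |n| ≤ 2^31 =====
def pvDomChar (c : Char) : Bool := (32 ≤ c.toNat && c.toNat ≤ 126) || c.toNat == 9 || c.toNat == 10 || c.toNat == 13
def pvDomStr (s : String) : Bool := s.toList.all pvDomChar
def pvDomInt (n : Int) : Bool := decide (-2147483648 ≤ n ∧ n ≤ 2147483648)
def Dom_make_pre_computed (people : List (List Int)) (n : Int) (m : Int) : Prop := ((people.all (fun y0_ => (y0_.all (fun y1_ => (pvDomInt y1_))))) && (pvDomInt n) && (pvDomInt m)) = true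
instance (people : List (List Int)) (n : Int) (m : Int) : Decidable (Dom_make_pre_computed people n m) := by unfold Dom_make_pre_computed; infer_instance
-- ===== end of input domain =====

-- B replaces the per-pair scan of all columns by a single walk over the columns that
-- buckets people by value and credits each bucket's pairs; same exact result (alternative
-- decomposition, not claimed faster).

-- f"{i+1} {j+1}" (shared by both sources verbatim)
def pvKey (i j : Int) : String := PySem.Int.toStr (i + 1) ++ " " ++ PySem.Int.toStr (j + 1)

-- ===== PORT A =====
def make_pre_computed (people : List (List Int)) (n : Int) (m : Int) : List (String × Int) :=
  ((PySem.List.pyRange 0 n).foldl (fun d i =>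
    let current := PySem.List.pyGetD people i []
    (PySem.List.pyRange (i + 1) n).foldl (fun d j =>
      let next_person := PySem.List.pyGetD people j []
      let counter := (PySem.List.pyRange 0 m).foldl (fun c k =>
        if PySem.List.pyGetD current k 0 = PySem.List.pyGetD next_person k 0 then c + 1 else c) (0 : Int)
      d.insert (pvKey i j) counter) d)
    (PySem.Dict.empty : PySem.Dict String Int)).items

-- ===== PORT B =====
def make_pre_computed_alt (people : List (List Int)) (n : Int) (m : Int) : List (String × Int) :=
  let res : PySem.Dict String Int := (PySem.List.pyRange 0 n).foldl (fun d i =>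
    (PySem.List.pyRange (i + 1) n).foldl (fun d j => d.insert (pvKey i j) 0) d)
    (PySem.Dict.empty : PySem.Dict String Int)
  if n < 2 then res.items else
  ((PySem.List.pyRange 0 m).foldl (fun res k =>
    let groups : PySem.Dict Int (List Int) := (PySem.List.pyRange 0 n).foldl (fun g p =>
      g.modify (PySem.List.pyGetD (PySem.List.pyGetD people p []) k 0) [] (fun l => l ++ [p]))
      (PySem.Dict.empty : PySem.Dict Int (List Int))
    groups.values.foldl (fun res g =>
      (PySem.List.pyRange 0 (PySem.List.len g)).foldl (fun res a =>
        (PySem.List.pyRange (a + 1) (PySem.List.len g)).foldl (fun res b =>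
          res.modify (pvKey (PySem.List.pyGetD g a 0) (PySem.List.pyGetD g b 0)) 0 (fun v => v + 1)) res) res) res) res).items

-- ===== PRECONDITION & SPEC =====
-- Pre_: exactly the inputs where Python A returns (no IndexError): the first n rows exist,
-- and when some pair loop body indexes columns (n ≥ 2, m > 0) each of those rows has ≥ m entries.
def Pre_make_pre_computed (people : List (List Int)) (n : Int) (m : Int) : Prop :=
  n ≤ (people.length : Int) ∧
    (2 ≤ n → 0 < m → ∀ row ∈ people.take n.toNat, m ≤ (row.length : Int))
instance (people : List (List Int)) (n : Int) (m : Int) : Decidable (Pre_make_pre_computed people n m) := by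
  unfold Pre_make_pre_computed; infer_instance
def pvWitness_make_pre_computed : List (List Int) × Int × Int := ([[1, 2], [1, 3]], 2, 2)
def Spec_make_pre_computed (people : List (List Int)) (n : Int) (m : Int) (out : List (String × Int)) : Prop :=
  out = make_pre_computed_alt people n m
instance (people : List (List Int)) (n : Int) (m : Int) (out : List (String × Int)) : Decidable (Spec_make_pre_computed people n m out) := by
  unfold Spec_make_pre_computed; infer_instance

-- ===== CLAIM (what is proved, stated in full; the proofs are below) =====
def Claim_equal_make_pre_computed : Prop := ∀ (people : List (List Int)) (n : Int) (m : Int), Dom_make_pre_computed people n m → Pre_make_pre_computed people n m → Spec_make_pre_computed people n m (make_pre_computed people n m)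

-- ===== LEMMAS AND PROOFS =====

-- ---- abbreviations used only by the proofs ----
def pvPairs (n : Int) : List (Int × Int) :=
  (PySem.List.pyRange 0 n).flatMap (fun i => (PySem.List.pyRange (i + 1) n).map (fun j => (i, j)))

def pvVal (people : List (List Int)) (k p : Int) : Int :=
  PySem.List.pyGetD (PySem.List.pyGetD people p []) k 0

def pvInd (people : List (List Int)) (k : Int) (p : Int × Int) : Int :=
  if pvVal people k p.1 = pvVal people k p.2 then 1 else 0

def pvPairsOf (g : List Int) : List (Int × Int) :=
  (PySem.List.pyRange 0 (PySem.List.len g)).flatMap (fun a =>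
    (PySem.List.pyRange (a + 1) (PySem.List.len g)).map (fun b =>
      (PySem.List.pyGetD g a 0, PySem.List.pyGetD g b 0)))

def pvGroups (people : List (List Int)) (n k : Int) : PySem.Dict Int (List Int) :=
  (PySem.List.pyRange 0 n).foldl (fun g p =>
    g.modify (pvVal people k p) [] (fun l => l ++ [p])) PySem.Dict.empty

def pvIncList (people : List (List Int)) (n k : Int) : List (Int × Int) :=
  (pvGroups people n k).values.flatMap pvPairsOf

def pvColStep (people : List (List Int)) (n : Int) (res : PySem.Dict String Int) (k : Int) : PySem.Dict String Int :=
  let groups : PySem.Dict Int (List Int) := (PySem.List.pyRange 0 n).foldl (fun g p =>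
    g.modify (PySem.List.pyGetD (PySem.List.pyGetD people p []) k 0) [] (fun l => l ++ [p]))
    (PySem.Dict.empty : PySem.Dict Int (List Int))
  groups.values.foldl (fun res g =>
    (PySem.List.pyRange 0 (PySem.List.len g)).foldl (fun res a =>
      (PySem.List.pyRange (a + 1) (PySem.List.len g)).foldl (fun res b =>
        res.modify (pvKey (PySem.List.pyGetD g a 0) (PySem.List.pyGetD g b 0)) 0 (fun v => v + 1)) res) res) res

-- ---- key injectivity ----
lemma pv_tdc (f : ℕ) : ∀ (n : ℕ) (ds : List Char), n < f →
    Nat.toDigitsCore 10 f n ds =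
      (if n = 0 then ['0'] else ((Nat.digits 10 n).map Nat.digitChar).reverse) ++ ds := by
  induction f with
  | zero => intro n ds h; omega
  | succ f ih =>
    intro n ds h
    by_cases h10 : n / 10 = 0
    · have hn : n < 10 := by omega
      by_cases h0 : n = 0
      · subst h0
        have : Nat.digitChar 0 = '0' := by decide
        simp [Nat.toDigitsCore, this]
      · have hd : Nat.digits 10 n = [n % 10] := by
          rw [Nat.digits_def' (by norm_num) (Nat.pos_of_ne_zero h0), h10]
          simp
        simp [Nat.toDigitsCore, h10, h0, hd, Nat.mod_eq_of_lt hn]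
    · have hpos : 0 < n := by omega
      have hlt : n / 10 < f := by omega
      have hstep : Nat.toDigitsCore 10 (f + 1) n ds
          = Nat.toDigitsCore 10 f (n / 10) (Nat.digitChar (n % 10) :: ds) := by
        simp [Nat.toDigitsCore, h10]
      rw [hstep, ih (n / 10) (Nat.digitChar (n % 10) :: ds) hlt]
      have hd : Nat.digits 10 n = n % 10 :: Nat.digits 10 (n / 10) :=
        Nat.digits_def' (by norm_num) hpos
      simp [h10, hd, hpos.ne']


lemma pv_toDigits10 (n : ℕ) :
    Nat.toDigits 10 n = if n = 0 then ['0'] else ((Nat.digits 10 n).map Nat.digitChar).reverse := by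
  show Nat.toDigitsCore 10 (n + 1) n [] = _
  rw [pv_tdc (n + 1) n [] (by omega)]
  simp


lemma pv_toDigits_inj {a b : ℕ} (h : Nat.toDigits 10 a = Nat.toDigits 10 b) : a = b := by
  have hx : ∀ x < 10, Nat.digitChar x = '0' → x = 0 := by decide
  have hmapinj : ∀ (l1 l2 : List ℕ), (∀ x ∈ l1, x < 10) → (∀ x ∈ l2, x < 10) →
      l1.map Nat.digitChar = l2.map Nat.digitChar → l1 = l2 := by
    intro l1
    induction l1 with
    | nil => intro l2 _ _ h; cases l2 <;> simp_all
    | cons a l1 ih =>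
      intro l2 hb1 hb2 h
      cases l2 with
      | nil => simp_all
      | cons b l2 =>
        simp only [List.map_cons, List.cons.injEq] at h
        have hab : a = b := by
          have : ∀ a < 10, ∀ b < 10, Nat.digitChar a = Nat.digitChar b → a = b := by decide
          exact this a (hb1 a (by simp)) b (hb2 b (by simp)) h.1
        have := ih l2 (fun x hx => hb1 x (by simp [hx])) (fun x hx => hb2 x (by simp [hx])) h.2
        simp [hab, this]
  rw [pv_toDigits10, pv_toDigits10] at h
  by_cases a0 : a = 0 <;> by_cases b0 : b = 0
  · omega
  · exfalso
    rw [if_pos a0, if_neg b0] at h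
    have hmap : (Nat.digits 10 b).map Nat.digitChar = ['0'] := by
      have := congrArg List.reverse h
      simpa using this.symm
    obtain ⟨x, hxd, hrest⟩ : ∃ x, Nat.digits 10 b = [x] ∧ Nat.digitChar x = '0' := by
      cases hdig : Nat.digits 10 b with
      | nil => rw [hdig] at hmap; simp at hmap
      | cons y ys =>
        rw [hdig] at hmap
        cases ys with
        | nil => simp at hmap; exact ⟨y, rfl, hmap⟩
        | cons z zs => simp at hmap
    have hx0 : x = 0 := hx x (Nat.digits_lt_base (by norm_num) (by rw [hxd]; simp)) hrest
    have : b = Nat.ofDigits 10 (Nat.digits 10 b) := (Nat.ofDigits_digits 10 b).symm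
    rw [hxd, hx0] at this
    simp [Nat.ofDigits] at this
    exact b0 this
  · exfalso
    rw [if_neg a0, if_pos b0] at h
    have hmap : (Nat.digits 10 a).map Nat.digitChar = ['0'] := by
      have := congrArg List.reverse h
      simpa using this
    obtain ⟨x, hxd, hrest⟩ : ∃ x, Nat.digits 10 a = [x] ∧ Nat.digitChar x = '0' := by
      cases hdig : Nat.digits 10 a with
      | nil => rw [hdig] at hmap; simp at hmap
      | cons y ys =>
        rw [hdig] at hmap
        cases ys with
        | nil => simp at hmap; exact ⟨y, rfl, hmap⟩
        | cons z zs => simp at hmap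
    have hx0 : x = 0 := hx x (Nat.digits_lt_base (by norm_num) (by rw [hxd]; simp)) hrest
    have : a = Nat.ofDigits 10 (Nat.digits 10 a) := (Nat.ofDigits_digits 10 a).symm
    rw [hxd, hx0] at this
    simp [Nat.ofDigits] at this
    exact a0 this
  · rw [if_neg a0, if_neg b0] at h
    have h2 : (Nat.digits 10 a).map Nat.digitChar = (Nat.digits 10 b).map Nat.digitChar := by
      have := congrArg List.reverse h
      simpa using this
    have := hmapinj _ _ (fun x hx => Nat.digits_lt_base (by norm_num) hx)
      (fun x hx => Nat.digits_lt_base (by norm_num) hx) h2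
    exact Nat.digits_inj_iff.mp this


lemma pv_nospace_toDigits (n : ℕ) : ' ' ∉ Nat.toDigits 10 n := by
  have hch : ∀ x < 10, Nat.digitChar x ≠ ' ' := by decide
  rw [pv_toDigits10]
  split
  · simp
  · intro hmem
    simp only [List.mem_reverse, List.mem_map] at hmem
    obtain ⟨x, hx, hc⟩ := hmem
    exact hch x (Nat.digits_lt_base (by norm_num) hx) hc


lemma pv_nodash_toDigits (n : ℕ) : '-' ∉ Nat.toDigits 10 n := by
  have hch : ∀ x < 10, Nat.digitChar x ≠ '-' := by decide
  rw [pv_toDigits10]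
  split
  · simp
  · intro hmem
    simp only [List.mem_reverse, List.mem_map] at hmem
    obtain ⟨x, hx, hc⟩ := hmem
    exact hch x (Nat.digits_lt_base (by norm_num) hx) hc



lemma pv_toChars_inj : Function.Injective PySem.Int.toChars := by
  intro a b h
  unfold PySem.Int.toChars at h
  split_ifs at h with h1 h2 h2
  · simp only [List.cons.injEq, true_and] at h
    have := pv_toDigits_inj h
    omega
  · exfalso
    have hnd := pv_nodash_toDigits b.toNat
    rw [← h] at hnd
    simp at hnd
  · exfalso
    have hnd := pv_nodash_toDigits a.toNat
    rw [h] at hnd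
    simp at hnd
  · have := pv_toDigits_inj h
    omega


lemma pv_nospace_toChars (n : Int) : ' ' ∉ PySem.Int.toChars n := by
  unfold PySem.Int.toChars
  split
  · simp [pv_nospace_toDigits]
  · exact pv_nospace_toDigits _


lemma pv_split {l1 r1 l2 r2 : List Char} (h1 : ' ' ∉ l1) (h2 : ' ' ∉ l2)
    (h : l1 ++ ' ' :: r1 = l2 ++ ' ' :: r2) : l1 = l2 ∧ r1 = r2 := by
  induction l1 generalizing l2 with
  | nil =>
    cases l2 with
    | nil => simpa using h
    | cons c l2 =>
      exfalso
      simp only [List.nil_append, List.cons_append, List.cons.injEq] at h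
      exact h2 (by simp [← h.1])
  | cons a l1 ih =>
    cases l2 with
    | nil =>
      exfalso
      simp only [List.cons_append, List.nil_append, List.cons.injEq] at h
      exact h1 (by simp [h.1])
    | cons c l2 =>
      simp only [List.cons_append, List.cons.injEq] at h
      obtain ⟨rfl, h⟩ := h
      have := ih (fun hm => h1 (by simp [hm])) (fun hm => h2 (by simp [hm])) h
      simp [this.1, this.2]


lemma pvKey_inj : Function.Injective (fun p : Int × Int => pvKey p.1 p.2) := by
  intro p q h
  simp only [pvKey] at h
  have h' := congrArg String.toList h
  simp only [String.toList_append, PySem.Int.toList_toStr] at h'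
  have hsp : (" " : String).toList = [' '] := rfl
  rw [hsp] at h'
  have h'' : PySem.Int.toChars (p.1 + 1) ++ ' ' :: PySem.Int.toChars (p.2 + 1)
      = PySem.Int.toChars (q.1 + 1) ++ ' ' :: PySem.Int.toChars (q.2 + 1) := by
    simpa using h'
  obtain ⟨e1, e2⟩ := pv_split (pv_nospace_toChars _) (pv_nospace_toChars _) h''
  have e1' := pv_toChars_inj e1
  have e2' := pv_toChars_inj e2
  have : p.1 = q.1 := by omega
  have : p.2 = q.2 := by omega
  exact Prod.ext (by omega) (by omega)


-- ---- generic list lemmas ----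
lemma pv_nested_foldl {α : Type} (F : α → Int × Int → α) (n : Int) (d : α) :
    (PySem.List.pyRange 0 n).foldl (fun d i =>
      (PySem.List.pyRange (i + 1) n).foldl (fun d j => F d (i, j)) d) d
    = (pvPairs n).foldl F d := by
  simp [pvPairs, List.foldl_flatMap, List.foldl_map]


lemma pv_mem_pvPairs {n : Int} {p : Int × Int} : p ∈ pvPairs n ↔ 0 ≤ p.1 ∧ p.1 < p.2 ∧ p.2 < n := by
  obtain ⟨x, y⟩ := p
  simp only [pvPairs, List.mem_flatMap, List.mem_map, PySem.List.mem_pyRange_one, Prod.mk.injEq]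
  constructor
  · rintro ⟨i, ⟨hi1, hi2⟩, j, ⟨hj1, hj2⟩, rfl, rfl⟩
    exact ⟨hi1, by omega, hj2⟩
  · rintro ⟨h1, h2, h3⟩
    exact ⟨x, ⟨h1, by omega⟩, y, ⟨by omega, h3⟩, rfl, rfl⟩


lemma pv_nodup_pvPairs (n : Int) : (pvPairs n).Nodup := by
  rw [pvPairs, List.nodup_flatMap]
  refine ⟨fun i _ => ?_, ?_⟩
  · exact List.Nodup.map (fun a b e => by simpa using congrArg Prod.snd e)
      (PySem.List.nodup_pyRange_one _ _)
  · apply (PySem.List.pairwise_lt_pyRange_one 0 n).imp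
    intro i1 i2 hlt a ha1 ha2
    simp only [List.mem_map] at ha1 ha2
    obtain ⟨j1, _, rfl⟩ := ha1
    obtain ⟨j2, _, he⟩ := ha2
    have := congrArg Prod.fst he
    simp at this
    omega


lemma pv_pvPairs_nil {n : Int} (h : n < 2) : pvPairs n = [] := by
  apply List.eq_nil_iff_forall_not_mem.mpr
  intro p hp
  have := pv_mem_pvPairs.mp hp
  omega


lemma pv_foldl_count {P : Int → Prop} [DecidablePred P] (l : List Int) (c : Int) :
    l.foldl (fun c k => if P k then c + 1 else c) c
      = c + (l.map (fun k => if P k then (1 : Int) else 0)).sum := by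
  induction l generalizing c with
  | nil => simp
  | cons h t ih =>
    simp only [List.foldl_cons, List.map_cons, List.sum_cons]
    rw [ih]
    split_ifs <;> ring


-- ---- A normal form ----
lemma pv_A_items (people : List (List Int)) (n m : Int) :
    make_pre_computed people n m
      = (pvPairs n).map (fun p => (pvKey p.1 p.2, ((PySem.List.pyRange 0 m).map (fun k => pvInd people k p)).sum)) := by
  calc make_pre_computed people n m
      = ((pvPairs n).foldl (fun d p => d.insert (pvKey p.1 p.2)
          ((PySem.List.pyRange 0 m).foldl (fun c k =>
            if PySem.List.pyGetD (PySem.List.pyGetD people p.1 []) k 0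
               = PySem.List.pyGetD (PySem.List.pyGetD people p.2 []) k 0 then c + 1 else c) (0 : Int)))
          (PySem.Dict.empty : PySem.Dict String Int)).items := by
        unfold make_pre_computed
        exact congrArg PySem.Dict.items (pv_nested_foldl (fun (d : PySem.Dict String Int) p => d.insert (pvKey p.1 p.2)
          ((PySem.List.pyRange 0 m).foldl (fun c k =>
            if PySem.List.pyGetD (PySem.List.pyGetD people p.1 []) k 0
               = PySem.List.pyGetD (PySem.List.pyGetD people p.2 []) k 0 then c + 1 else c) (0 : Int))) n _)
    _ = _ := by
        rw [PySem.Dict.items_foldl_insert_fresh (pvPairs n) (fun p => pvKey p.1 p.2) _ _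
          (fun a _ => PySem.Dict.contains_empty _) (List.Nodup.map pvKey_inj (pv_nodup_pvPairs n))]
        have hemp : (PySem.Dict.empty : PySem.Dict String Int).items = [] := rfl
        rw [hemp, List.nil_append]
        apply List.map_congr_left
        intro p hp
        rw [pv_foldl_count]
        simp only [pvInd, pvVal, zero_add]
        refine congrArg (fun z => (pvKey p.1 p.2, z)) ?_
        apply congrArg List.sum
        apply List.map_congr_left
        intro k _
        by_cases hc : PySem.List.pyGetD (PySem.List.pyGetD people p.1 []) k 0
            = PySem.List.pyGetD (PySem.List.pyGetD people p.2 []) k 0 <;> simp [hc]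


-- ---- B: init normal form ----
lemma pv_B_init (n : Int) :
    ((PySem.List.pyRange 0 n).foldl (fun d i =>
      (PySem.List.pyRange (i + 1) n).foldl (fun d j => d.insert (pvKey i j) 0) d)
      (PySem.Dict.empty : PySem.Dict String Int)).items
    = (pvPairs n).map (fun p => (pvKey p.1 p.2, (0 : Int))) := by
  calc ((PySem.List.pyRange 0 n).foldl (fun d i =>
      (PySem.List.pyRange (i + 1) n).foldl (fun d j => d.insert (pvKey i j) 0) d)
      (PySem.Dict.empty : PySem.Dict String Int)).items
      = ((pvPairs n).foldl (fun d p => d.insert (pvKey p.1 p.2) 0)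
          (PySem.Dict.empty : PySem.Dict String Int)).items := by
        exact congrArg PySem.Dict.items (pv_nested_foldl (fun (d : PySem.Dict String Int) p => d.insert (pvKey p.1 p.2) (0 : Int)) n _)
    _ = _ := by
        rw [PySem.Dict.items_foldl_insert_fresh (pvPairs n) (fun p => pvKey p.1 p.2) _ _
          (fun a _ => PySem.Dict.contains_empty _) (List.Nodup.map pvKey_inj (pv_nodup_pvPairs n))]
        rfl


-- ---- groups / incList characterisation ----
lemma pv_groups_getD (people : List (List Int)) (n k c : Int) :
    (pvGroups people n k).getD c [] = (PySem.List.pyRange 0 n).filter (fun q => pvVal people k q == c) := by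
  have h2 : ((PySem.List.pyRange 0 n).map (fun q => (pvVal people k q, q))).foldl
      (fun d pr => d.modify pr.1 [] (fun l => l ++ [pr.2]))
      (PySem.Dict.empty : PySem.Dict Int (List Int)) = pvGroups people n k := by
    rw [List.foldl_map]
    rfl
  rw [← h2, PySem.Dict.getD_foldl_modify_append, PySem.Dict.getD_empty, List.nil_append,
    List.filter_map, List.map_map]
  simp [Function.comp_def]


lemma pv_mem_pairsOf {g : List Int} (hg : g.Pairwise (· < ·)) (x y : Int) :
    (x, y) ∈ pvPairsOf g ↔ x ∈ g ∧ y ∈ g ∧ x < y := by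
  simp only [pvPairsOf, List.mem_flatMap, List.mem_map, PySem.List.mem_pyRange_one,
    PySem.List.len_eq]
  constructor
  · rintro ⟨a, ⟨ha0, haL⟩, b, ⟨hb1, hbL⟩, he⟩
    have ha' : a.toNat < g.length := by omega
    have hb' : b.toNat < g.length := by omega
    rw [PySem.List.pyGetD_of_nonneg _ _ ha0, PySem.List.pyGetD_of_nonneg _ _ (by omega),
      List.getD_eq_getElem _ _ ha', List.getD_eq_getElem _ _ hb', Prod.mk.injEq] at he
    obtain ⟨hex, hey⟩ := he
    refine ⟨hex ▸ List.getElem_mem ha', hey ▸ List.getElem_mem hb', ?_⟩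
    rw [← hex, ← hey]
    exact List.pairwise_iff_getElem.mp hg a.toNat b.toNat ha' hb' (by omega)
  · rintro ⟨hx, hy, hxy⟩
    obtain ⟨a, ha, hga⟩ := List.getElem_of_mem hx
    obtain ⟨b, hb, hgb⟩ := List.getElem_of_mem hy
    have hab : a < b := by
      rcases lt_trichotomy a b with h | h | h
      · exact h
      · exfalso; subst h; rw [hga] at hgb; omega
      · exfalso
        have := List.pairwise_iff_getElem.mp hg b a hb ha h
        omega
    refine ⟨(a : ℤ), ⟨by omega, by omega⟩, (b : ℤ), ⟨by omega, by omega⟩, ?_⟩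
    rw [PySem.List.pyGetD_of_nonneg _ _ (by omega), PySem.List.pyGetD_of_nonneg _ _ (by omega)]
    simp only [Int.toNat_natCast]
    rw [List.getD_eq_getElem _ _ ha, List.getD_eq_getElem _ _ hb, hga, hgb]

lemma pv_nodup_pairsOf {g : List Int} (hg : g.Pairwise (· < ·)) : (pvPairsOf g).Nodup := by
  rw [pvPairsOf, List.nodup_flatMap]
  constructor
  · intro a ha
    simp only [PySem.List.mem_pyRange_one, PySem.List.len_eq] at ha
    apply List.Nodup.map_on ?_ (PySem.List.nodup_pyRange_one _ _)
    intro b1 hb1 b2 hb2 he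
    simp only [PySem.List.mem_pyRange_one, PySem.List.len_eq] at hb1 hb2
    have h1 : b1.toNat < g.length := by omega
    have h2 : b2.toNat < g.length := by omega
    rw [Prod.mk.injEq] at he
    have he2 := he.2
    rw [PySem.List.pyGetD_of_nonneg _ _ (by omega), PySem.List.pyGetD_of_nonneg _ _ (by omega),
      List.getD_eq_getElem _ _ h1, List.getD_eq_getElem _ _ h2] at he2
    by_contra hne
    rcases Nat.lt_or_ge b1.toNat b2.toNat with h | h
    · have := List.pairwise_iff_getElem.mp hg b1.toNat b2.toNat h1 h2 h
      omega
    · have hlt : b2.toNat < b1.toNat := by omega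
      have := List.pairwise_iff_getElem.mp hg b2.toNat b1.toNat h2 h1 hlt
      omega
  · apply List.Pairwise.imp_of_mem ?_ (PySem.List.pairwise_lt_pyRange_one 0 (PySem.List.len g))
    intro a1 a2 ha1 ha2 hlt p hp1 hp2
    simp only [PySem.List.mem_pyRange_one, PySem.List.len_eq] at ha1 ha2
    simp only [List.mem_map, PySem.List.mem_pyRange_one, PySem.List.len_eq] at hp1 hp2
    obtain ⟨b1, hb1, he1⟩ := hp1
    obtain ⟨b2, hb2, he2⟩ := hp2
    have hfst := congrArg Prod.fst (he1.trans he2.symm)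
    simp only at hfst
    have h1 : a1.toNat < g.length := by omega
    have h2 : a2.toNat < g.length := by omega
    rw [PySem.List.pyGetD_of_nonneg _ _ (by omega), List.getD_eq_getElem _ _ h1] at hfst
    rw [PySem.List.pyGetD_of_nonneg _ _ (by omega), List.getD_eq_getElem _ _ h2] at hfst
    have := List.pairwise_iff_getElem.mp hg a1.toNat a2.toNat h1 h2 (by omega)
    omega

lemma pv_pairsOf_foldl {α : Type} (F : α → Int × Int → α) (g : List Int) (d : α) :
    (PySem.List.pyRange 0 (PySem.List.len g)).foldl (fun d a =>
      (PySem.List.pyRange (a + 1) (PySem.List.len g)).foldl (fun d b =>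
        F d (PySem.List.pyGetD g a 0, PySem.List.pyGetD g b 0)) d) d
    = (pvPairsOf g).foldl F d := by
  simp [pvPairsOf, List.foldl_flatMap, List.foldl_map]

lemma pv_update_id {α : Type} [BEq α] [LawfulBEq α] (l : List α) (s : PySem.Set α)
    (h : ∀ x ∈ l, x ∈ s) : PySem.Set.update s l = s := by
  induction l generalizing s with
  | nil => rfl
  | cons a t ih =>
    show PySem.Set.update (s.add a) t = s
    rw [PySem.Set.add_of_mem (h a (by simp))]
    exact ih s (fun x hx => h x (by simp [hx]))

lemma pv_keys_groups (people : List (List Int)) (n k : Int) :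
    (pvGroups people n k).keys
      = PySem.Set.update ([] : PySem.Set Int) ((PySem.List.pyRange 0 n).map (pvVal people k)) := by
  rw [pvGroups, PySem.Dict.keys_foldl_modify_key (PySem.List.pyRange 0 n) (pvVal people k) []
    (fun _ p l => l ++ [p]) PySem.Dict.empty, PySem.Dict.keys_empty]

lemma pv_mem_keys_groups {people : List (List Int)} {n k c : Int} :
    c ∈ (pvGroups people n k).keys ↔ ∃ q, (0 ≤ q ∧ q < n) ∧ pvVal people k q = c := by
  rw [pv_keys_groups]
  simp [PySem.Set.mem_update, List.mem_map, PySem.List.mem_pyRange_one]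

lemma pv_nodup_keys_groups (people : List (List Int)) (n k : Int) :
    (pvGroups people n k).keys.Nodup := by
  rw [pvGroups]
  exact PySem.Dict.nodup_keys_foldl_modify_key (PySem.List.pyRange 0 n) (pvVal people k) []
    (fun _ p l => l ++ [p]) PySem.Dict.empty PySem.Dict.nodup_keys_empty

lemma pv_values_groups (people : List (List Int)) (n k : Int) :
    (pvGroups people n k).values = (pvGroups people n k).keys.map
      (fun c => (PySem.List.pyRange 0 n).filter (fun q => pvVal people k q == c)) := by
  show (pvGroups people n k).items.map (fun x => x.2) = _
  rw [PySem.Dict.items_eq_map_keys _ (pv_nodup_keys_groups people n k) ([] : List Int),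
    List.map_map]
  apply List.map_congr_left
  intro c _
  simp [pv_groups_getD]

lemma pv_sorted_filter (people : List (List Int)) (n k c : Int) :
    ((PySem.List.pyRange 0 n).filter (fun q => pvVal people k q == c)).Pairwise (· < ·) :=
  (PySem.List.pairwise_lt_pyRange_one 0 n).filter _

lemma pv_mem_incList {people : List (List Int)} {n k : Int} {x y : Int} :
    (x, y) ∈ pvIncList people n k ↔ 0 ≤ x ∧ x < y ∧ y < n ∧ pvVal people k x = pvVal people k y := by
  rw [pvIncList, pv_values_groups]
  simp only [List.mem_flatMap, List.mem_map]
  constructor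
  · rintro ⟨g, ⟨c, hc, rfl⟩, hmem⟩
    rw [pv_mem_pairsOf (pv_sorted_filter people n k c)] at hmem
    obtain ⟨hx, hy, hxy⟩ := hmem
    simp only [List.mem_filter, PySem.List.mem_pyRange_one, beq_iff_eq] at hx hy
    exact ⟨hx.1.1, hxy, hy.1.2, by rw [hx.2, hy.2]⟩
  · rintro ⟨hx0, hxy, hyn, hval⟩
    refine ⟨(PySem.List.pyRange 0 n).filter (fun q => pvVal people k q == pvVal people k x),
      ⟨pvVal people k x, pv_mem_keys_groups.mpr ⟨x, ⟨hx0, by omega⟩, rfl⟩, rfl⟩, ?_⟩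
    rw [pv_mem_pairsOf (pv_sorted_filter people n k _)]
    refine ⟨?_, ?_, hxy⟩
    · simp [List.mem_filter, PySem.List.mem_pyRange_one]
      omega
    · simp [List.mem_filter, PySem.List.mem_pyRange_one, hval]
      omega


lemma pv_nodup_incList (people : List (List Int)) (n k : Int) : (pvIncList people n k).Nodup := by
  rw [pvIncList, pv_values_groups, List.nodup_flatMap]
  constructor
  · intro g hgm
    simp only [List.mem_map] at hgm
    obtain ⟨c, _, rfl⟩ := hgm
    exact pv_nodup_pairsOf (pv_sorted_filter people n k c)
  · rw [List.pairwise_map]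
    apply (pv_nodup_keys_groups people n k).imp
    intro c1 c2 hne p hp1 hp2
    obtain ⟨x, y⟩ := p
    rw [pv_mem_pairsOf (pv_sorted_filter people n k c1)] at hp1
    rw [pv_mem_pairsOf (pv_sorted_filter people n k c2)] at hp2
    have h1 := hp1.1
    have h2 := hp2.1
    simp only [List.mem_filter, beq_iff_eq] at h1 h2
    exact hne (by rw [← h1.2, h2.2])


lemma pv_count_incList {people : List (List Int)} {n k : Int} {p : Int × Int} (hp : p ∈ pvPairs n) :
    (pvIncList people n k).count p = (pvInd people k p).toNat := by
  obtain ⟨x, y⟩ := p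
  have hm := pv_mem_pvPairs.mp hp
  by_cases hv : pvVal people k x = pvVal people k y
  · have hmem : (x, y) ∈ pvIncList people n k :=
      pv_mem_incList.mpr ⟨hm.1, hm.2.1, hm.2.2, hv⟩
    rw [List.count_eq_one_of_mem (pv_nodup_incList people n k) hmem]
    simp [pvInd, hv]
  · have hmem : (x, y) ∉ pvIncList people n k := fun hc => hv (pv_mem_incList.mp hc).2.2.2
    rw [List.count_eq_zero_of_not_mem hmem]
    simp [pvInd, hv]


-- ---- one column ----
lemma pv_col_step (people : List (List Int)) (n k : Int) (v : Int × Int → Int) (d : PySem.Dict String Int)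
    (hd : d.items = (pvPairs n).map (fun p => (pvKey p.1 p.2, v p))) :
    (pvColStep people n d k).items = (pvPairs n).map (fun p => (pvKey p.1 p.2, v p + pvInd people k p)) := by
  have hflat : pvColStep people n d k
      = (pvIncList people n k).foldl (fun d q => d.modify (pvKey q.1 q.2) 0 (fun v => v + 1)) d := by
    show (pvGroups people n k).values.foldl (fun res g =>
      (PySem.List.pyRange 0 (PySem.List.len g)).foldl (fun res a =>
        (PySem.List.pyRange (a + 1) (PySem.List.len g)).foldl (fun res b =>
          res.modify (pvKey (PySem.List.pyGetD g a 0) (PySem.List.pyGetD g b 0)) 0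
            (fun v => v + 1)) res) res) d = _
    rw [pvIncList, List.foldl_flatMap]
    apply PySem.List.foldl_congr_mem
    intro acc g _
    exact pv_pairsOf_foldl (fun d q => d.modify (pvKey q.1 q.2) 0 (fun v => v + 1)) g acc
  have hdk : d.keys = (pvPairs n).map (fun p => pvKey p.1 p.2) := by
    show d.items.map (fun x => x.1) = _
    rw [hd, List.map_map]
    rfl
  have hdknd : d.keys.Nodup := by
    rw [hdk]; exact List.Nodup.map pvKey_inj (pv_nodup_pvPairs n)
  have hmap : (pvIncList people n k).foldl
        (fun d q => d.modify (pvKey q.1 q.2) 0 (fun v => v + 1)) d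
      = ((pvIncList people n k).map (fun q => pvKey q.1 q.2)).foldl
        (fun d x => d.modify x 0 (fun v => v + 1)) d := by
    rw [List.foldl_map]
  have hsub : ∀ x ∈ (pvIncList people n k).map (fun q => pvKey q.1 q.2), x ∈ d.keys := by
    intro x hx
    simp only [List.mem_map] at hx
    obtain ⟨q, hq, rfl⟩ := hx
    obtain ⟨qx, qy⟩ := q
    have hmem := pv_mem_incList.mp hq
    rw [hdk]
    exact List.mem_map_of_mem (pv_mem_pvPairs.mpr ⟨hmem.1, hmem.2.1, hmem.2.2.1⟩)
  have hkeys' : (((pvIncList people n k).map (fun q => pvKey q.1 q.2)).foldl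
        (fun d x => d.modify x 0 (fun v => v + 1)) d).keys = d.keys := by
    rw [PySem.Dict.keys_foldl_modify ((pvIncList people n k).map (fun q => pvKey q.1 q.2)) 0
      (fun _ _ v => v + 1) d]
    exact pv_update_id _ d.keys hsub
  have hnodup' : (((pvIncList people n k).map (fun q => pvKey q.1 q.2)).foldl
        (fun d x => d.modify x 0 (fun v => v + 1)) d).keys.Nodup := by
    rw [hkeys']; exact hdknd
  rw [hflat, hmap, PySem.Dict.items_eq_map_keys _ hnodup' 0, hkeys', hdk, List.map_map]
  apply List.map_congr_left
  intro p hp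
  simp only [Function.comp_def]
  refine congrArg (fun z => (pvKey p.1 p.2, z)) ?_
  rw [PySem.Dict.getD_foldl_modify_add_one _ d (pvKey p.1 p.2),
    List.count_map_of_injective _ _ pvKey_inj p, pv_count_incList hp]
  have hget : d.getD (pvKey p.1 p.2) 0 = v p := by
    apply PySem.Dict.getD_of_mem_items d ?_ hdknd
    rw [hd]
    exact List.mem_map_of_mem hp
  rw [hget]
  have hcast : (((pvInd people k p).toNat : Int)) = pvInd people k p := by
    unfold pvInd; split <;> simp
  rw [hcast]


-- ---- all columns ----
lemma pv_cols_fold (people : List (List Int)) (n : Int) (ks : List Int) :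
    ∀ (v : Int × Int → Int) (d : PySem.Dict String Int),
      d.items = (pvPairs n).map (fun p => (pvKey p.1 p.2, v p)) →
      (ks.foldl (pvColStep people n) d).items
        = (pvPairs n).map (fun p => (pvKey p.1 p.2, v p + (ks.map (fun k => pvInd people k p)).sum)) := by
  induction ks with
  | nil => intro v d hd; simpa using hd
  | cons k ks ih =>
    intro v d hd
    simp only [List.foldl_cons, List.map_cons, List.sum_cons]
    rw [ih (fun p => v p + pvInd people k p) _ (pv_col_step people n k v d hd)]
    apply List.map_congr_left
    intro p _
    simp [add_assoc]


-- ===== VERDICT (by name: the statement is the Claim_ definition above) =====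
theorem make_pre_computed_spec : Claim_equal_make_pre_computed := by
  intro people n m _ _
  unfold Spec_make_pre_computed
  rw [pv_A_items]
  by_cases h2 : n < 2
  · simp only [make_pre_computed_alt, if_pos h2]
    rw [pv_B_init, pv_pvPairs_nil h2]
    simp
  · simp only [make_pre_computed_alt, if_neg h2]
    have hfold := pv_cols_fold people n (PySem.List.pyRange 0 m) (fun _ => (0 : Int)) _ (pv_B_init n)
    refine Eq.trans ?_ hfold.symm
    apply List.map_congr_left
    intro p _
    simp
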